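-- pv_equiv track=rewrite | github.com/nroxa92/me_suite | research_gti155.py | diff_regions
-- ===== SOURCE A (Python) =====
-- def diff_regions(d1, d2, min_block=16):
--     """Nađi najveće diff blokove između dva bin fajla."""
--     size = min(len(d1), len(d2))
--     diffs = []
--     in_diff = False
--     start = 0
--     for i in range(size):
--         if d1[i] != d2[i]:
--             if not in_diff:
--                 in_diff = True
--                 start = i
--         else:
--             if in_diff:
--                 in_diff = False
--                 length = i - start
--                 if length >= min_block:
--                     diffs.append((start, length))
--     if in_diff:
--         length = size - start
--         if length >= min_block:
--             diffs.append((start, length))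
--     return diffs
-- ===== SOURCE B (Python) =====
-- def diff_regions(d1, d2, min_block=16):
--     """Collect differing indices, then segment them into maximal consecutive runs (two-pass)."""
--     size = min(len(d1), len(d2))
--     idxs = [i for i in range(size) if d1[i] != d2[i]]
--     blocks = []
--     k = 0
--     n = len(idxs)
--     while k < n:
--         first = idxs[k]
--         end = first
--         while k + 1 < n and idxs[k + 1] == end + 1:
--             k += 1
--             end = idxs[k]
--         length = end - first + 1
--         if length >= min_block:
--             blocks.append((first, length))
--         k += 1
--     return blocks
-- ===== Notes on version B (the rewrite author's own statement) =====
-- stated objective: alternative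
-- what changed: Replaces A's single-pass in_diff/start boolean state machine with a two-pass decomposition: first collect all indices where the buffers differ, then segment that index list into maximal consecutive runs and emit (start, length) for runs of length >= min_block.
import Mathlib
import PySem

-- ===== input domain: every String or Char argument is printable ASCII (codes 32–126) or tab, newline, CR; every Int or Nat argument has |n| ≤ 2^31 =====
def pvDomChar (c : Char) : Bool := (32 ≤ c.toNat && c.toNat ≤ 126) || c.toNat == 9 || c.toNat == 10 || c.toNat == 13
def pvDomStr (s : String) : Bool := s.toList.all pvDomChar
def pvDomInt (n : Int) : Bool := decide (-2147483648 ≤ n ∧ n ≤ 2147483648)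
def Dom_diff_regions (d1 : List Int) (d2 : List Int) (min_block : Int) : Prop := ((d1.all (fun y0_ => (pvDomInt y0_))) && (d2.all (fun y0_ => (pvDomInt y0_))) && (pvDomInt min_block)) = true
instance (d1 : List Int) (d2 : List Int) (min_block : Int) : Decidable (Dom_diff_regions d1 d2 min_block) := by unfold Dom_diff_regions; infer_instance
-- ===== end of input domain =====

-- B replaces A's in_diff/start state machine by a two-pass decomposition:
-- collect all differing indices, then segment that list into maximal consecutive
-- runs (objective: alternative decomposition, same cost).

-- ===== PORT A =====
-- single left-to-right scan with state (diffs, in_diff, start); d1[i]/d2[i] read with pyGetD (i always in range)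
def diff_regions (d1 : List Int) (d2 : List Int) (min_block : Int) : List (Int × Int) :=
  let size : Int := min (d1.length : Int) (d2.length : Int)
  let st := (PySem.List.pyRange 0 size 1).foldl
    (fun (s : List (Int × Int) × Bool × Int) i =>
      if PySem.List.pyGetD d1 i 0 ≠ PySem.List.pyGetD d2 i 0 then
        if !s.2.1 then (s.1, true, i) else s
      else
        if s.2.1 then
          ((if i - s.2.2 ≥ min_block then s.1 ++ [(s.2.2, i - s.2.2)] else s.1), false, s.2.2)
        else s)
    ([], false, 0)
  if st.2.1 then
    (if size - st.2.2 ≥ min_block then st.1 ++ [(st.2.2, size - st.2.2)] else st.1)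
  else st.1

-- ===== PORT B =====
-- inner while: extend the run while the next collected index is consecutive
def segTake (endv : Int) (rest : List Int) : Int × List Int :=
  match rest with
  | [] => (endv, [])
  | j :: js => if j = endv + 1 then segTake j js else (endv, j :: js)

theorem segTake_len (endv : Int) (rest : List Int) : (segTake endv rest).2.length ≤ rest.length := by
  induction rest generalizing endv with
  | nil => simp [segTake]
  | cons j js ih =>
    simp only [segTake]
    split
    · exact le_trans (ih j) (by simp)
    · simp

-- outer while over the collected index list
def segments (min_block : Int) : List Int → List (Int × Int)
  | [] => []
  | first :: rest =>
    let p := segTake first rest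
    let length := p.1 - first + 1
    (if length ≥ min_block then [(first, length)] else []) ++ segments min_block p.2
termination_by l => l.length
decreasing_by exact Nat.lt_succ_of_le (segTake_len first rest)

def diff_regions_alt (d1 : List Int) (d2 : List Int) (min_block : Int) : List (Int × Int) :=
  let size : Int := min (d1.length : Int) (d2.length : Int)
  let idxs := (PySem.List.pyRange 0 size 1).filter
    (fun i => PySem.List.pyGetD d1 i 0 ≠ PySem.List.pyGetD d2 i 0)
  segments min_block idxs

-- ===== PRECONDITION & SPEC =====
def Spec_diff_regions (d1 : List Int) (d2 : List Int) (min_block : Int) (out : List (Int × Int)) : Prop := out = diff_regions_alt d1 d2 min_block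
instance (d1 : List Int) (d2 : List Int) (min_block : Int) (out : List (Int × Int)) : Decidable (Spec_diff_regions d1 d2 min_block out) := by unfold Spec_diff_regions; infer_instance

-- ===== CLAIM (what is proved, stated in full; the proofs are below) =====
def Claim_equal_diff_regions : Prop := ∀ (d1 : List Int) (d2 : List Int) (min_block : Int), Dom_diff_regions d1 d2 min_block → Spec_diff_regions d1 d2 min_block (diff_regions d1 d2 min_block)

-- ===== LEMMAS AND PROOFS =====

@[simp] theorem segments_nil (m : Int) : segments m [] = [] := by simp [segments]

theorem segments_cons (m : Int) (first : Int) (rest : List Int) :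
    segments m (first :: rest) =
      (if (segTake first rest).1 - first + 1 ≥ m then [(first, (segTake first rest).1 - first + 1)] else [])
        ++ segments m (segTake first rest).2 := by
  rw [segments]

-- A's abstract step function and finalizer (p i = "d1[i] ≠ d2[i]")
def stepA (m : Int) (p : Int → Bool) (s : List (Int × Int) × Bool × Int) (i : Int) :
    List (Int × Int) × Bool × Int :=
  if p i then
    if !s.2.1 then (s.1, true, i) else s
  else
    if s.2.1 then
      ((if i - s.2.2 ≥ m then s.1 ++ [(s.2.2, i - s.2.2)] else s.1), false, s.2.2)
    else s

def finA (m size : Int) (st : List (Int × Int) × Bool × Int) : List (Int × Int) :=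
  if st.2.1 then (if size - st.2.2 ≥ m then st.1 ++ [(st.2.2, size - st.2.2)] else st.1) else st.1

theorem stepA_pos_closed (m : Int) (p : Int → Bool) {i : Int} (hp : p i = true)
    (acc : List (Int × Int)) (s0 : Int) : stepA m p (acc, false, s0) i = (acc, true, i) := by
  simp [stepA, hp]

theorem stepA_neg_closed (m : Int) (p : Int → Bool) {i : Int} (hp : p i = false)
    (acc : List (Int × Int)) (s0 : Int) : stepA m p (acc, false, s0) i = (acc, false, s0) := by
  simp [stepA, hp]

theorem stepA_pos_open (m : Int) (p : Int → Bool) {i : Int} (hp : p i = true)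
    (acc : List (Int × Int)) (st : Int) : stepA m p (acc, true, st) i = (acc, true, st) := by
  simp [stepA, hp]

theorem stepA_neg_open (m : Int) (p : Int → Bool) {i : Int} (hp : p i = false)
    (acc : List (Int × Int)) (st : Int) :
    stepA m p (acc, true, st) i = ((if i - st ≥ m then acc ++ [(st, i - st)] else acc), false, st) := by
  simp [stepA, hp]

-- segTake swallows a full consecutive run
theorem segTake_run : ∀ (n : Nat) (e b : Int) (idxs : List Int), (b - e).toNat = n → e ≤ b →
    idxs.head? ≠ some (b + 1) →
    segTake e (PySem.List.pyRange (e + 1) (b + 1) 1 ++ idxs) = (b, idxs) := by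
  intro n
  induction n with
  | zero =>
    intro e b idxs h0 heb hhd
    have heq : e = b := by omega
    subst heq
    rw [PySem.List.pyRange_one_eq_nil (by omega)]
    cases idxs with
    | nil => simp [segTake]
    | cons j js =>
      simp only [List.head?] at hhd
      simp only [List.nil_append, segTake]
      rw [if_neg (by intro h; exact hhd (by rw [h]))]
  | succ n ih =>
    intro e b idxs h0 heb hhd
    have hlt : e < b := by omega
    rw [PySem.List.pyRange_one_cons (by omega)]
    simp only [List.cons_append, segTake, if_true]
    exact ih (e + 1) b idxs (by omega) (by omega) hhd

-- segments on a nonempty contiguous run followed by indices past the run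
theorem segments_run (m : Int) (st a : Int) (idxs : List Int) (hlt : st < a)
    (hhd : idxs.head? ≠ some a) :
    segments m (PySem.List.pyRange st a 1 ++ idxs) =
      (if a - st ≥ m then [(st, a - st)] else []) ++ segments m idxs := by
  rw [PySem.List.pyRange_one_cons hlt]
  rw [List.cons_append, segments_cons]
  have h : PySem.List.pyRange (st + 1) a 1 ++ idxs
      = PySem.List.pyRange (st + 1) ((a - 1) + 1) 1 ++ idxs := by norm_num
  rw [h, segTake_run (a - 1 - st).toNat st (a - 1) idxs rfl (by omega)
        (by simpa using hhd)]
  have h2 : a - 1 - st + 1 = a - st := by omega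
  rw [h2]

-- head of a filtered tail of pyRange (a+1) b 1 is never a
theorem head_filter_ne (p : Int → Bool) (a b : Int) :
    ((PySem.List.pyRange (a + 1) b 1).filter p).head? ≠ some a := by
  intro h
  have hmem : a ∈ (PySem.List.pyRange (a + 1) b 1).filter p := List.mem_of_mem_head? h
  have := (List.mem_filter.mp hmem).1
  rw [PySem.List.mem_pyRange_one] at this
  omega

-- main loop invariant, both loop states at once
theorem loop_main (m : Int) (p : Int → Bool) : ∀ (n : Nat) (a b : Int), (b - a).toNat = n →
    (∀ (s0 : Int) (acc : List (Int × Int)),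
      finA m b ((PySem.List.pyRange a b 1).foldl (stepA m p) (acc, false, s0)) =
        acc ++ segments m ((PySem.List.pyRange a b 1).filter p)) ∧
    (∀ (st : Int) (acc : List (Int × Int)), st < a → a ≤ b →
      finA m b ((PySem.List.pyRange a b 1).foldl (stepA m p) (acc, true, st)) =
        acc ++ segments m (PySem.List.pyRange st a 1 ++ (PySem.List.pyRange a b 1).filter p)) := by
  intro n
  induction n with
  | zero =>
    intro a b h0
    have hba : b ≤ a := by omega
    rw [PySem.List.pyRange_one_eq_nil hba]
    constructor
    · intro s0 acc; simp [finA]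
    · intro st acc hst hab
      have hab' : a = b := le_antisymm hab hba
      subst hab'
      have hseg := segments_run m st a [] hst (by simp)
      simp only [List.append_nil, segments_nil] at hseg
      simp only [List.foldl_nil, List.filter_nil, List.append_nil, finA, hseg]
      split_ifs <;> simp
  | succ n ih =>
    intro a b h0
    have hlt : a < b := by omega
    have ih' := ih (a + 1) b (by omega)
    rw [PySem.List.pyRange_one_cons hlt]
    constructor
    · intro s0 acc
      by_cases hp : p a = true
      · rw [List.foldl_cons, stepA_pos_closed m p hp, (ih').2 a acc (by omega) (by omega),
            PySem.List.pyRange_one_singleton]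
        simp [hp]
      · have hp' : p a = false := by cases h : p a <;> simp_all
        rw [List.foldl_cons, stepA_neg_closed m p hp', (ih').1 s0 acc]
        simp [hp']
    · intro st acc hst hab
      by_cases hp : p a = true
      · rw [List.foldl_cons, stepA_pos_open m p hp, (ih').2 st acc (by omega) (by omega),
            PySem.List.pyRange_one_succ_right (by omega : st ≤ a)]
        simp [hp]
      · have hp' : p a = false := by cases h : p a <;> simp_all
        rw [List.foldl_cons, stepA_neg_open m p hp', (ih').1 st _]
        have hfil : (a :: PySem.List.pyRange (a + 1) b 1).filter p
            = (PySem.List.pyRange (a + 1) b 1).filter p := by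
          simp [hp']
        rw [hfil, segments_run m st a _ hst (head_filter_ne p a b)]
        split <;> simp

-- the inline loop body of port A is stepA with the concrete predicate
theorem lam_eq (d1 d2 : List Int) (m : Int) :
    (fun (s : List (Int × Int) × Bool × Int) (i : Int) =>
       if PySem.List.pyGetD d1 i 0 ≠ PySem.List.pyGetD d2 i 0 then
         if !s.2.1 then (s.1, true, i) else s
       else
         if s.2.1 then
           ((if i - s.2.2 ≥ m then s.1 ++ [(s.2.2, i - s.2.2)] else s.1), false, s.2.2)
         else s)
    = stepA m (fun i => decide (PySem.List.pyGetD d1 i 0 ≠ PySem.List.pyGetD d2 i 0)) := by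
  funext s i
  by_cases h : PySem.List.pyGetD d1 i 0 ≠ PySem.List.pyGetD d2 i 0 <;> simp [stepA, h]

-- ===== VERDICT (by name: the statement is the Claim_ definition above) =====
theorem diff_regions_spec : Claim_equal_diff_regions := by
  intro d1 d2 m _
  unfold Spec_diff_regions diff_regions diff_regions_alt
  rw [lam_eq d1 d2 m]
  have h := (loop_main m
      (fun i => decide (PySem.List.pyGetD d1 i 0 ≠ PySem.List.pyGetD d2 i 0))
      (min (d1.length : Int) (d2.length : Int) - 0).toNat 0
      (min (d1.length : Int) (d2.length : Int)) rfl).1 0 []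
  simp only [List.nil_append] at h
  rw [← h]
  rfl
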